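-- pv_equiv track=rewrite | github.com/leadlea/asd | scripts/build_transcript_compare_html.py | pick_first_existing
-- ===== SOURCE A (Python) =====
-- from typing import Dict, List, Optional, Tuple
--
-- def pick_first_existing(cols: List[str], candidates: List[str]) -> Optional[str]:
--     s = set(cols)
--     for c in candidates:
--         if c in s:
--             return c
--     # try case-insensitive match
--     lower = {c.lower(): c for c in cols}
--     for c in candidates:
--         if c.lower() in lower:
--             return lower[c.lower()]
--     return None
-- ===== SOURCE B (Python) =====
-- def pick_first_existing(cols, candidates):
--     s = set(cols)
--     lower = {c.lower(): c for c in cols}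
--     first_ci = None
--     for c in candidates:
--         if c in s:
--             return c
--         if first_ci is None and c.lower() in lower:
--             first_ci = lower[c.lower()]
--     return first_ci
-- ===== Notes on version B (the rewrite author's own statement) =====
-- stated objective: alternative
-- what changed: Replaces A's two sequential scans over candidates (exact pass, then a case-insensitive pass) by one single pass that returns on the first exact match and carries the first case-insensitive hit in an accumulator.
import Mathlib
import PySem

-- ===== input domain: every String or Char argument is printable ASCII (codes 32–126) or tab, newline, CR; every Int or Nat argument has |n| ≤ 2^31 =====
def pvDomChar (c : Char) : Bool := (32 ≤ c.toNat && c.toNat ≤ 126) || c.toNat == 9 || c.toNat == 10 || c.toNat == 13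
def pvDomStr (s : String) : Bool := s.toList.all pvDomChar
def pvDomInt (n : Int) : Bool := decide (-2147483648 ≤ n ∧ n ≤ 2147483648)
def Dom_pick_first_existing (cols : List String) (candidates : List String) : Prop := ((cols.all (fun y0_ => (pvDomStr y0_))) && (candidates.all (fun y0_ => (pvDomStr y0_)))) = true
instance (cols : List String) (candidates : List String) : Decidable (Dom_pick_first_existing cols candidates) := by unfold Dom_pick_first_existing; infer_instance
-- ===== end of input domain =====

-- B merges A's two sequential scans over candidates into one pass with an accumulator
-- for the first case-insensitive hit; exact matches still win globally. Same return value.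

-- ===== PORT A =====
-- first loop of A: return the first candidate that is in set s
def pfeExact (s : PySem.Set String) : List String → Option String
  | [] => none
  | c :: rest => if PySem.Set.contains s c then some c else pfeExact s rest

-- second loop of A: 'if c.lower() in lower: return lower[c.lower()]' — the membership
-- test plus indexing is exactly 'match get? with some v => return v' (no KeyError possible)
def pfeCI (lower : PySem.Dict String String) : List String → Option String
  | [] => none
  | c :: rest =>
    match lower.get? (PySem.Str.lower c) with
    | some v => some v
    | none => pfeCI lower rest

def pick_first_existing (cols : List String) (candidates : List String) : Option String :=
  let s := PySem.Set.ofList cols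
  match pfeExact s candidates with
  | some c => some c
  | none =>
    let lower := cols.foldl (fun d c => d.insert (PySem.Str.lower c) c) PySem.Dict.empty
    pfeCI lower candidates

-- ===== PORT B =====
-- single pass: return on exact match, else record the first case-insensitive hit in acc
def pfeLoop (s : PySem.Set String) (lower : PySem.Dict String String) :
    List String → Option String → Option String
  | [], acc => acc
  | c :: rest, acc =>
    if PySem.Set.contains s c then some c
    else pfeLoop s lower rest
      (match acc with
       | some a => some a
       | none => lower.get? (PySem.Str.lower c))

def pick_first_existing_alt (cols : List String) (candidates : List String) : Option String :=
  let s := PySem.Set.ofList cols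
  let lower := cols.foldl (fun d c => d.insert (PySem.Str.lower c) c) PySem.Dict.empty
  pfeLoop s lower candidates none

-- ===== PRECONDITION & SPEC =====
def Spec_pick_first_existing (cols : List String) (candidates : List String) (out : Option String) : Prop := out = pick_first_existing_alt cols candidates
instance (cols : List String) (candidates : List String) (out : Option String) : Decidable (Spec_pick_first_existing cols candidates out) := by unfold Spec_pick_first_existing; infer_instance

-- ===== CLAIM (what is proved, stated in full; the proofs are below) =====
def Claim_equal_pick_first_existing : Prop := ∀ (cols : List String) (candidates : List String), Dom_pick_first_existing cols candidates → Spec_pick_first_existing cols candidates (pick_first_existing cols candidates)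

-- ===== LEMMAS AND PROOFS =====
-- B's one-pass loop computes: first exact match if any, else acc, else A's CI scan.
theorem pfeLoop_eq (s : PySem.Set String) (lower : PySem.Dict String String) :
    ∀ (cs : List String) (acc : Option String),
      pfeLoop s lower cs acc =
        match pfeExact s cs with
        | some c => some c
        | none =>
          match acc with
          | some a => some a
          | none => pfeCI lower cs := by
  intro cs
  induction cs with
  | nil => intro acc; cases acc <;> simp [pfeLoop, pfeExact, pfeCI]
  | cons c rest ih =>
    intro acc
    simp only [pfeLoop, pfeExact, pfeCI, ih]
    split
    · rfl
    · cases acc with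
      | some a => rfl
      | none => cases lower.get? (PySem.Str.lower c) <;> rfl

-- ===== VERDICT (by name: the statement is the Claim_ definition above) =====
theorem pick_first_existing_spec : Claim_equal_pick_first_existing := by
  intro cols candidates _
  unfold Spec_pick_first_existing pick_first_existing pick_first_existing_alt
  rw [pfeLoop_eq]
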